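-- pv_equiv track=rewrite | github.com/tn-pisama/mao-testing-research | backend/app/detection_enterprise/ml_detector_v2.py | _max_consecutive_same
-- ===== SOURCE A (Python) =====
-- from typing import Any, Dict, List, Optional, Tuple
--
-- def _max_consecutive_same(turns: List[Dict]) -> int:
--     """Find max consecutive turns from same speaker."""
--     if not turns:
--         return 0
--     max_count = 1
--     current_count = 1
--     for i in range(1, len(turns)):
--         if turns[i].get("participant") == turns[i-1].get("participant"):
--             current_count += 1
--             max_count = max(max_count, current_count)
--         else:
--             current_count = 1
--     return max_count
-- ===== SOURCE B (Python) =====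
-- def _max_consecutive_same(turns):
--     """Find max consecutive turns from same speaker.
--
--     Brute force: for every start index i, scan forward while the speaker
--     stays equal to the speaker at i, and take the max of those run lengths.
--     """
--     keys = [t.get("participant") for t in turns]
--     n = len(keys)
--     best = 0
--     for i in range(n):
--         j = i
--         while j < n and keys[j] == keys[i]:
--             j += 1
--         best = max(best, j - i)
--     return best
-- ===== Notes on version B (the rewrite author's own statement) =====
-- stated objective: alternative
-- what changed: Replaced A's single-pass running current/max counters with a nested brute-force search: for every start index, scan forward while the speaker stays the same, and take the maximum of those per-start run lengths (max of runs starting at a run's first element equals the max run length).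
import Mathlib
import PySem

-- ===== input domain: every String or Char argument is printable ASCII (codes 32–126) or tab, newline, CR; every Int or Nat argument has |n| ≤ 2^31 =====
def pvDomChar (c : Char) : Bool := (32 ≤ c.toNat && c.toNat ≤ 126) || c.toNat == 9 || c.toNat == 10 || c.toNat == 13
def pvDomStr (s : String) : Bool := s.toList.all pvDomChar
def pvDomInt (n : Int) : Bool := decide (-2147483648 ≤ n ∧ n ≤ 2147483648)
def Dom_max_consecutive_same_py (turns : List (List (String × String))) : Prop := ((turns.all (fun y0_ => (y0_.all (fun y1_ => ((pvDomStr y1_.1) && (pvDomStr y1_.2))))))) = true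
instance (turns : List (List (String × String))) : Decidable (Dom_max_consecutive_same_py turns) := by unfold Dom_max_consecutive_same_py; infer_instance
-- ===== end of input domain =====

-- B replaces A's single-pass running current/max counters with a brute-force search:
-- for every start position, scan forward while the speaker stays equal to the one at the
-- start, and take the max of those per-start run lengths (alternative; O(n^2) worst case).

-- ===== PORT A =====
-- t.get("participant") on a dict given as an association list
def pvKey (t : List (String × String)) : Option String := PySem.Dict.get? (PySem.Dict.mk t) "participant"

-- literal transliteration of A: early return on empty, then a fold over range(1, len(turns))
-- carrying the (max_count, current_count) pair, comparing turns[i] with turns[i-1].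
def max_consecutive_same_py (turns : List (List (String × String))) : Int :=
  if turns = [] then 0
  else
    ((PySem.List.pyRange 1 (turns.length : Int)).foldl
      (fun (s : Int × Int) i =>
        if pvKey (PySem.List.pyGetD turns i [])
            = pvKey (PySem.List.pyGetD turns (i - 1) [])
        then (max s.1 (s.2 + 1), s.2 + 1)
        else (s.1, 1))
      (1, 1)).1

-- ===== PORT B =====
-- transliteration of Source B: keys = [t.get("participant") for t in turns]; then for each start
-- position (= each suffix of keys) the inner while loop counts forward while keys[j] == keys[i]
-- (pvRunFromK), and best accumulates the max of those lengths (pvBestK).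
def pvRunFromK (k : Option String) : List (Option String) → Int
  | [] => 0
  | x :: xs => if x = k then 1 + pvRunFromK k xs else 0

def pvBestK : List (Option String) → Int
  | [] => 0
  | x :: xs => max (pvRunFromK x (x :: xs)) (pvBestK xs)

def max_consecutive_same_py_alt (turns : List (List (String × String))) : Int :=
  pvBestK (turns.map pvKey)

-- ===== PRECONDITION & SPEC =====
def Spec_max_consecutive_same_py (turns : List (List (String × String))) (out : Int) : Prop := out = max_consecutive_same_py_alt turns
instance (turns : List (List (String × String))) (out : Int) : Decidable (Spec_max_consecutive_same_py turns out) := by unfold Spec_max_consecutive_same_py; infer_instance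

-- ===== CLAIM (what is proved, stated in full; the proofs are below) =====
def Claim_equal_max_consecutive_same_py : Prop := ∀ (turns : List (List (String × String))), Dom_max_consecutive_same_py turns → Spec_max_consecutive_same_py turns (max_consecutive_same_py turns)

-- ===== LEMMAS AND PROOFS =====

-- A's loop body, named for the proofs.
def pvStepA (turns : List (List (String × String))) (s : Int × Int) (i : Int) : Int × Int :=
  if pvKey (PySem.List.pyGetD turns i [])
      = pvKey (PySem.List.pyGetD turns (i - 1) [])
  then (max s.1 (s.2 + 1), s.2 + 1)
  else (s.1, 1)

-- A's loop rephrased as structural recursion over the suffix, carrying the previous key.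
def pvScanP (k : Option String) (s : Int × Int) : List (List (String × String)) → Int × Int
  | [] => s
  | t :: ts =>
    let k' := pvKey t
    if k' = k then pvScanP k' (max s.1 (s.2 + 1), s.2 + 1) ts
    else pvScanP k' (s.1, 1) ts

-- the lengths of the maximal runs of consecutive equal keys (proof-side only)
def pvRunLensGo (k : Option String) (n : Int) : List (List (String × String)) → List Int
  | [] => [n]
  | t :: ts =>
    let k' := pvKey t
    if k' = k then pvRunLensGo k (n + 1) ts
    else n :: pvRunLensGo k' 1 ts

-- every run length that pvRunLensGo emits first is at least the running count it started from
theorem pvRunLensGo_head_ge (ts : List (List (String × String))) (k : Option String) (c : Int) :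
    ∃ r t', pvRunLensGo k c ts = r :: t' ∧ c ≤ r := by
  induction ts generalizing k c with
  | nil => exact ⟨c, [], rfl, le_refl c⟩
  | cons t ts ih =>
    by_cases h : pvKey t = k
    · obtain ⟨r, t', hEq, hle⟩ := ih k (c + 1)
      exact ⟨r, t', by simp [pvRunLensGo, h, hEq], by omega⟩
    · exact ⟨c, pvRunLensGo (pvKey t) 1 ts, by simp [pvRunLensGo, h], le_refl c⟩

-- A's index loop over pyRange j len equals the structural scan over the dropped suffix
theorem pvFoldl_eq_scanP (turns : List (List (String × String))) :
    ∀ (j : Nat) (s : Int × Int), 1 ≤ j → j ≤ turns.length →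
      (PySem.List.pyRange (j : Int) (turns.length : Int)).foldl (pvStepA turns) s
        = pvScanP (pvKey (turns.getD (j - 1) [])) s (turns.drop j) := by
  intro j s h1 h2
  induction hn : turns.length - j generalizing j s with
  | zero =>
    have hj : turns.length ≤ j := by omega
    rw [PySem.List.pyRange_one_eq_nil (by exact_mod_cast hj), List.drop_eq_nil_of_le hj]
    rfl
  | succ n ih =>
    have hj : j < turns.length := by omega
    rw [PySem.List.pyRange_one_cons (by exact_mod_cast hj)]
    have hdrop : turns.drop j = turns[j] :: turns.drop (j + 1) :=
      (List.getElem_cons_drop hj).symm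
    have hgj : PySem.List.pyGetD turns (j : Int) [] = turns[j] := by
      rw [PySem.List.pyGetD_eq_getElem turns [] (by positivity) (by exact_mod_cast hj)]
      simp
    have hgj1 : PySem.List.pyGetD turns ((j : Int) - 1) [] = turns.getD (j - 1) [] := by
      have : (j : Int) - 1 = ((j - 1 : Nat) : Int) := by omega
      rw [this, PySem.List.pyGetD_natCast]
    have hstep : ∀ s', pvStepA turns s' (j : Int)
        = (if pvKey turns[j]
              = pvKey (turns.getD (j - 1) [])
           then (max s'.1 (s'.2 + 1), s'.2 + 1) else (s'.1, 1)) := by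
      intro s'; simp [pvStepA, hgj, hgj1]
    have hcast : (j : Int) + 1 = ((j + 1 : Nat) : Int) := by push_cast; ring
    have hgd : turns.getD ((j + 1) - 1) [] = turns[j] := by
      simp [List.getD_eq_getElem?_getD, hj]
    rw [List.foldl_cons, hstep, hcast, hdrop]
    by_cases h : pvKey turns[j]
        = pvKey (turns.getD (j - 1) [])
    · rw [if_pos h]
      rw [ih (j + 1) _ (by omega) (by omega) (by omega)]
      simp only [pvScanP, h, if_pos]
      have hgd2 : turns.getD (j + 1 - 1) [] = turns[j] := by
        simp [List.getD_eq_getElem?_getD, hj]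
      rw [hgd2, h]
    · rw [if_neg h]
      rw [ih (j + 1) _ (by omega) (by omega) (by omega)]
      simp only [pvScanP, h]
      have hgd2 : turns.getD (j + 1 - 1) [] = turns[j] := by
        simp [List.getD_eq_getElem?_getD, hj]
      rw [hgd2]
      simp

-- the structural scan computes the running max of the run lengths
theorem pvScanP_eq_foldl_max (ts : List (List (String × String))) :
    ∀ (k : Option String) (m c : Int), 1 ≤ c → c ≤ m →
      (pvScanP k (m, c) ts).1 = List.foldl max m (pvRunLensGo k c ts) := by
  induction ts with
  | nil =>
    intro k m c _ hcm
    simp [pvScanP, pvRunLensGo, max_eq_left hcm]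
  | cons t ts ih =>
    intro k m c hc hcm
    by_cases h : pvKey t = k
    · have hA : pvScanP k (m, c) (t :: ts) = pvScanP k (max m (c + 1), c + 1) ts := by
        simp [pvScanP, h]
      have hB : pvRunLensGo k c (t :: ts) = pvRunLensGo k (c + 1) ts := by
        simp [pvRunLensGo, h]
      rw [hA, hB]
      rw [ih k (max m (c + 1)) (c + 1) (by omega) (le_max_right _ _)]
      obtain ⟨r, t', hEq, hle⟩ := pvRunLensGo_head_ge ts k (c + 1)
      rw [hEq]
      simp only [List.foldl_cons]
      congr 1
      rw [max_assoc, max_eq_right hle]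
    · have hA : pvScanP k (m, c) (t :: ts) = pvScanP (pvKey t) (m, 1) ts := by
        simp [pvScanP, h]
      have hB : pvRunLensGo k c (t :: ts) = c :: pvRunLensGo (pvKey t) 1 ts := by
        simp [pvRunLensGo, h]
      rw [hA, hB]
      rw [ih (pvKey t) m 1 (le_refl 1) (by omega)]
      simp only [List.foldl_cons]
      rw [max_eq_left hcm]

-- run-from lengths are nonnegative
theorem pvRunFromK_nonneg (k : Option String) (l : List (Option String)) : 0 ≤ pvRunFromK k l := by
  induction l with
  | nil => simp [pvRunFromK]
  | cons x xs ih =>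
    by_cases h : x = k <;> simp [pvRunFromK, h]
    omega

-- best over suffix starts is nonnegative
theorem pvBestK_nonneg (l : List (Option String)) : 0 ≤ pvBestK l := by
  induction l with
  | nil => simp [pvBestK]
  | cons x xs ih =>
    simp only [pvBestK]
    have := pvRunFromK_nonneg x (x :: xs)
    omega

-- the max over run lengths equals max(carry + leading match, best over suffix starts)
theorem pvFoldlMax_runLensGo (ts : List (List (String × String))) :
    ∀ (k : Option String) (m c : Int), 0 ≤ c →
      List.foldl max m (pvRunLensGo k c ts)
        = max m (max (c + pvRunFromK k (ts.map pvKey)) (pvBestK (ts.map pvKey))) := by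
  induction ts with
  | nil =>
    intro k m c hc
    simp [pvRunLensGo, pvRunFromK, pvBestK]
    omega
  | cons t ts ih =>
    intro k m c hc
    have hlead := pvRunFromK_nonneg (pvKey t) (ts.map pvKey)
    by_cases h : pvKey t = k
    · have hB : pvRunLensGo k c (t :: ts) = pvRunLensGo k (c + 1) ts := by
        simp [pvRunLensGo, h]
      rw [hB, ih k m (c + 1) (by omega)]
      simp only [List.map_cons, pvRunFromK, pvBestK, h, reduceIte]
      omega
    · have hB : pvRunLensGo k c (t :: ts) = c :: pvRunLensGo (pvKey t) 1 ts := by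
        simp [pvRunLensGo, h]
      rw [hB, List.foldl_cons, ih (pvKey t) (max m c) 1 (by omega)]
      simp only [List.map_cons, pvRunFromK, pvBestK, h, reduceIte]
      omega

-- ===== VERDICT (by name: the statement is the Claim_ definition above) =====
theorem max_consecutive_same_py_spec : Claim_equal_max_consecutive_same_py := by
  intro turns _
  unfold Spec_max_consecutive_same_py max_consecutive_same_py max_consecutive_same_py_alt
  cases turns with
  | nil => simp [pvBestK]
  | cons t ts =>
    rw [if_neg (by simp)]
    have hfold := pvFoldl_eq_scanP (t :: ts) 1 (1, 1) (le_refl 1) (by simp)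
    have hstep : (fun (s : Int × Int) i =>
        if pvKey (PySem.List.pyGetD (t :: ts) i [])
            = pvKey (PySem.List.pyGetD (t :: ts) (i - 1) [])
        then (max s.1 (s.2 + 1), s.2 + 1)
        else (s.1, 1)) = pvStepA (t :: ts) := rfl
    rw [hstep]
    rw [show ((1 : Nat) : Int) = (1 : Int) from rfl] at hfold
    rw [hfold]
    have hgd0 : (t :: ts).getD (1 - 1) [] = t := rfl
    simp only [hgd0, List.drop_one, List.tail_cons]
    rw [pvScanP_eq_foldl_max ts (pvKey t) 1 1 (le_refl 1) (le_refl 1)]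
    rw [pvFoldlMax_runLensGo ts (pvKey t) 1 1 (by omega)]
    have hlead := pvRunFromK_nonneg (pvKey t) (ts.map pvKey)
    simp only [List.map_cons, pvBestK]
    rw [show pvRunFromK (pvKey t) (pvKey t :: ts.map pvKey)
          = 1 + pvRunFromK (pvKey t) (ts.map pvKey) by simp [pvRunFromK]]
    have hbest : 0 ≤ pvBestK (ts.map pvKey) := pvBestK_nonneg _
    omega
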